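-- pv_equiv track=rewrite | github.com/chengwanru/CSC311-Project | report_figures.py | _short_labels
-- ===== SOURCE A (Python) =====
-- def _short_labels(names: list[str]) -> list[str]:
--     out = []
--     for n in names:
--         if "Starry" in n:
--             out.append("Starry Night")
--         elif "Water Lily" in n:
--             out.append("Water Lily")
--         elif "Persistence" in n:
--             out.append("Persistence")
--         else:
--             out.append(n[:12])
--     return out
-- ===== SOURCE B (Python) =====
-- PATTERNS = [("Starry", "Starry Night"), ("Water Lily", "Water Lily"), ("Persistence", "Persistence")]
--
-- def _short_labels(names: list[str]) -> list[str]: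
--     # Pattern-major staged passes: one full sweep per pattern fills still-empty
--     # slots; iterating patterns in priority order preserves first-match priority.
--     out = [None] * len(names)
--     for pat, label in PATTERNS:
--         for i, n in enumerate(names):
--             if out[i] is None and pat in n:
--                 out[i] = label
--     return [n[:12] if label is None else label for label, n in zip(out, names)]
-- ===== Notes on version B (the rewrite author's own statement) =====
-- stated objective: alternative
-- what changed: Inverted the loop nesting: instead of one name-major pass through an if/elif chain, B makes one staged sweep per pattern over a slot array, filling only still-empty slots (pattern-major order preserves priority), then a final pass fills truncation fallbacks.
import Mathlib
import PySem

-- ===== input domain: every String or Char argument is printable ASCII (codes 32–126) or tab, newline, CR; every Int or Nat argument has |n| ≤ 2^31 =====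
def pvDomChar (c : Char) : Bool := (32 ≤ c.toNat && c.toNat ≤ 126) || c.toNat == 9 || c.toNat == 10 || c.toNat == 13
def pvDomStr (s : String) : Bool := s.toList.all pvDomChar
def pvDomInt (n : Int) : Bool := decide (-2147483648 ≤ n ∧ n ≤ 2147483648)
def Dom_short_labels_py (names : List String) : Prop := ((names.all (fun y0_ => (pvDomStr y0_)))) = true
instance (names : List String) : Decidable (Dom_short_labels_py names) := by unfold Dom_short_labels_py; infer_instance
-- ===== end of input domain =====

-- B inverts the loop nesting: one staged sweep per pattern fills still-empty slots, then a final
-- fallback pass (alternative decomposition; same cost).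

-- ===== PORT A =====
-- out = []; for n in names: if/elif chain with appends
def short_labels_py (names : List String) : List String :=
  names.foldl (fun out n =>
    if PySem.Str.isIn "Starry" n then out ++ ["Starry Night"]
    else if PySem.Str.isIn "Water Lily" n then out ++ ["Water Lily"]
    else if PySem.Str.isIn "Persistence" n then out ++ ["Persistence"]
    else out ++ [PySem.Str.slice n none (some 12)]) []

-- ===== PORT B =====
def PATTERNS : List (String × String) :=
  [("Starry", "Starry Night"), ("Water Lily", "Water Lily"), ("Persistence", "Persistence")]

-- inner pass: for i, n in enumerate(names): if out[i] is None and pat in n: out[i] = label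
-- (index-wise update over parallel lists, transcribed as zipWith over out and names)
def fillPass (pat label : String) (out : List (Option String)) (names : List String) :
    List (Option String) :=
  List.zipWith (fun o n => if o.isNone && PySem.Str.isIn pat n then some label else o) out names

def short_labels_py_alt (names : List String) : List String :=
  let out := PATTERNS.foldl (fun out pl => fillPass pl.1 pl.2 out names)
    (names.map (fun _ => (none : Option String)))
  List.zipWith (fun o n =>
    match o with
    | none => PySem.Str.slice n none (some 12)
    | some l => l) out names

-- ===== PRECONDITION & SPEC =====
def Spec_short_labels_py (names : List String) (out : List String) : Prop := out = short_labels_py_alt names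
instance (names : List String) (out : List String) : Decidable (Spec_short_labels_py names out) := by unfold Spec_short_labels_py; infer_instance

-- ===== CLAIM (what is proved, stated in full; the proofs are below) =====
def Claim_equal_short_labels_py : Prop := ∀ (names : List String), Dom_short_labels_py names → Spec_short_labels_py names (short_labels_py names)

-- ===== LEMMAS AND PROOFS =====

-- zipWith of a map over the same list acts pointwise
theorem zipWith_map_self {α β γ : Type} (f : β → α → γ) (h : α → β) (l : List α) :
    List.zipWith f (l.map h) l = l.map (fun a => f (h a) a) := by
  induction l with
  | nil => rfl
  | cons a t ih => simp [ih]

-- the fold of pointwise passes over a pointwise initial state is a pointwise fold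
theorem foldl_fillPass (pats : List (String × String)) (names : List String)
    (h : String → Option String) :
    pats.foldl (fun out pl => fillPass pl.1 pl.2 out names) (names.map h)
      = names.map (fun n => pats.foldl (fun o pl =>
          if o.isNone && PySem.Str.isIn pl.1 n then some pl.2 else o) (h n)) := by
  induction pats generalizing h with
  | nil => simp
  | cons p rest ih =>
    simp only [List.foldl_cons]
    rw [show fillPass p.1 p.2 (names.map h) names
          = names.map (fun n => if (h n).isNone && PySem.Str.isIn p.1 n then some p.2 else h n)
        from zipWith_map_self _ _ _, ih]

-- per-element value of B
def label1 (n : String) : String :=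
  match PATTERNS.foldl (fun o pl =>
      if o.isNone && PySem.Str.isIn pl.1 n then some pl.2 else o) (none : Option String) with
  | none => PySem.Str.slice n none (some 12)
  | some l => l

theorem alt_eq_map (names : List String) : short_labels_py_alt names = names.map label1 := by
  unfold short_labels_py_alt
  rw [foldl_fillPass, zipWith_map_self]
  rfl

theorem short_labels_foldl (names : List String) (acc : List String) :
    names.foldl (fun out n =>
      if PySem.Str.isIn "Starry" n then out ++ ["Starry Night"]
      else if PySem.Str.isIn "Water Lily" n then out ++ ["Water Lily"]
      else if PySem.Str.isIn "Persistence" n then out ++ ["Persistence"]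
      else out ++ [PySem.Str.slice n none (some 12)]) acc
    = acc ++ names.map label1 := by
  induction names generalizing acc with
  | nil => simp
  | cons n rest ih =>
    simp only [List.foldl_cons, List.map_cons, ih, label1, PATTERNS, List.foldl]
    by_cases h1 : PySem.Str.isIn "Starry" n <;>
      by_cases h2 : PySem.Str.isIn "Water Lily" n <;>
        by_cases h3 : PySem.Str.isIn "Persistence" n <;>
          (simp only [PySem.Str.isIn_eq,
             show "Starry".toList = ['S','t','a','r','r','y'] from rfl,
             show "Water Lily".toList = ['W','a','t','e','r',' ','L','i','l','y'] from rfl,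
             show "Persistence".toList = ['P','e','r','s','i','s','t','e','n','c','e'] from rfl] at h1 h2 h3;
           simp [h1, h2, h3])

-- ===== VERDICT (by name: the statement is the Claim_ definition above) =====
theorem short_labels_py_spec : Claim_equal_short_labels_py := by
  intro names _
  show short_labels_py names = short_labels_py_alt names
  rw [alt_eq_map, short_labels_py, short_labels_foldl]
  simp
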